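-- pv_equiv track=rewrite | github.com/rshinytools/Cortex_Dash | backend/app/services/widget_engines/subject_timeline.py | group_events_by_category
-- ===== SOURCE A (Python) =====
-- from typing import Dict, Any, List, Optional, Tuple
--
-- def group_events_by_category(events: List[Dict]) -> Dict[str, List[Dict]]:
--     """Group events by category for swim lane view"""
--     grouped = {}
--
--     for event in events:
--         category = event.get("event_category", "Other")
--         if category not in grouped:
--             grouped[category] = []
--         grouped[category].append(event)
--
--     # Sort events within each category
--     for category in grouped:
--         grouped[category].sort(key=lambda x: x.get("event_date", ""))
--
--     return grouped
-- ===== SOURCE B (Python) =====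
-- def group_events_by_category(events):
--     """Group events by category for swim lane view.
--
--     One global stable sort by event_date, then a single grouping pass:
--     per-category order equals sorting each group (stability)."""
--     ordered = sorted(events, key=lambda x: x.get("event_date", ""))
--     grouped = {}
--     for event in events:
--         grouped.setdefault(event.get("event_category", "Other"), [])
--     for event in ordered:
--         grouped[event.get("event_category", "Other")].append(event)
--     return grouped
-- ===== Notes on version B (the rewrite author's own statement) =====
-- stated objective: alternative
-- what changed: Replaces A's build-groups-then-sort-each-category-in-place loops with one global stable sort by event_date followed by a single grouping pass (stability makes per-category order identical).
import Mathlib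
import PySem

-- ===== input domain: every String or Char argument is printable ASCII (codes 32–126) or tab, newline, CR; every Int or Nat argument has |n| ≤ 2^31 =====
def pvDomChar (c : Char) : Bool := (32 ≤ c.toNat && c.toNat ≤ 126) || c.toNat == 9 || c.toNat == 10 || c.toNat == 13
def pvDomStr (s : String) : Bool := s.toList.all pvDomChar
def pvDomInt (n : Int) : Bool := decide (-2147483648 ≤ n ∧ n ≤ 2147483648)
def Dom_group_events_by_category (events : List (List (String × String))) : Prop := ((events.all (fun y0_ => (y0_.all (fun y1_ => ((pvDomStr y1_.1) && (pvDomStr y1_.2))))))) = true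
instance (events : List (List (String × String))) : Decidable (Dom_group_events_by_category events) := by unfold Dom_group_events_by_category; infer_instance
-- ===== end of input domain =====

-- B replaces A's per-category sorting passes by ONE global stable sort by date followed by
-- a single grouping pass (objective: alternative decomposition; return value only — A mutates
-- its per-category lists in place via .sort(), which is invisible to callers of this function).

-- event.get("event_category", "Other") / event.get("event_date", "")
def pvCat (e : List (String × String)) : String :=
  (PySem.Dict.mk e).getD "event_category" "Other"
def pvDate (e : List (String × String)) : String :=
  (PySem.Dict.mk e).getD "event_date" ""

-- ===== PORT A =====
def group_events_by_category (events : List (List (String × String))) :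
    List (String × List (List (String × String))) :=
  -- for event in events: if category not in grouped: grouped[category] = []; grouped[category].append(event)
  let grouped := events.foldl
    (fun d e =>
      let category := pvCat e
      let d := if d.contains category = true then d
               else d.insert category ([] : List (List (String × String)))
      d.modify category [] (fun v => v ++ [e]))
    PySem.Dict.empty
  -- for category in grouped: grouped[category].sort(key=lambda x: x.get("event_date", ""))
  let grouped := grouped.keys.foldl
    (fun d c => d.modify c [] (fun v => PySem.List.sorted v pvDate)) grouped
  grouped.items

-- ===== PORT B =====
def group_events_by_category_alt (events : List (List (String × String))) :
    List (String × List (List (String × String))) :=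
  let ordered := PySem.List.sorted events pvDate
  let grouped := events.foldl
    (fun d e => d.setdefault (pvCat e) ([] : List (List (String × String))))
    PySem.Dict.empty
  let grouped := ordered.foldl
    (fun d e => d.modify (pvCat e) [] (fun v => v ++ [e])) grouped
  grouped.items

-- ===== PRECONDITION & SPEC =====
def Spec_group_events_by_category (events : List (List (String × String))) (out : List (String × List (List (String × String)))) : Prop := out = group_events_by_category_alt events
instance (events : List (List (String × String))) (out : List (String × List (List (String × String)))) : Decidable (Spec_group_events_by_category events out) := by unfold Spec_group_events_by_category; infer_instance

-- ===== CLAIM (what is proved, stated in full; the proofs are below) =====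
def Claim_equal_group_events_by_category : Prop := ∀ (events : List (List (String × String))), Dom_group_events_by_category events → Spec_group_events_by_category events (group_events_by_category events)

-- ===== LEMMAS AND PROOFS =====

theorem pv_insertBy_nil {α : Type} (b : α → α → Bool) (x : α) :
    PySem.List.insertBy b x [] = [x] := rfl

theorem pv_insertBy_cons {α : Type} (b : α → α → Bool) (x y : α) (ys : List α) :
    PySem.List.insertBy b x (y :: ys)
    = if b x y then x :: y :: ys else y :: PySem.List.insertBy b x ys := rfl

theorem pv_getD_of_not_contains {κ ν : Type} [BEq κ] (d : PySem.Dict κ ν) (k : κ) (dflt : ν)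
    (h : d.contains k = false) : d.getD k dflt = dflt := by
  simp only [PySem.Dict.contains, List.any_eq_false] at h
  have hf : List.find? (fun p => p.1 == k) d.items = none :=
    List.find?_eq_none.mpr (fun p hp => by simpa using h p hp)
  simp [PySem.Dict.getD, PySem.Dict.get?, hf]

-- A's "if absent, insert []; then append" step is one modify
theorem pv_stepA_eq (d : PySem.Dict String (List (List (String × String)))) (e : List (String × String)) :
    (if d.contains (pvCat e) = true then d
     else d.insert (pvCat e) ([] : List (List (String × String)))).modify (pvCat e) [] (fun v => v ++ [e])
    = d.modify (pvCat e) [] (fun v => v ++ [e]) := by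
  by_cases h : d.contains (pvCat e) = true
  · simp [h]
  · have hc : d.contains (pvCat e) = false := by simpa using h
    simp [hc, PySem.Dict.modify, PySem.Dict.getD_insert_self,
      PySem.Dict.insert_insert_self, pv_getD_of_not_contains d _ _ hc]

-- the grouping fold: value at c is d's value plus the events of category c, in order
theorem pv_getD_groupfold (l : List (List (String × String)))
    (d : PySem.Dict String (List (List (String × String)))) (c : String) :
    (l.foldl (fun d e => d.modify (pvCat e) [] (fun v => v ++ [e])) d).getD c []
    = d.getD c [] ++ l.filter (fun e => pvCat e == c) := by
  have h := PySem.Dict.getD_foldl_modify_append (l.map (fun e => (pvCat e, e))) d c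
  rw [List.foldl_map, List.filter_map, List.map_map] at h
  rw [h]
  congr 1
  simp [Function.comp_def]

theorem pv_dict_contains_eq_keys_contains {κ ν : Type} [BEq κ] [LawfulBEq κ]
    (d : PySem.Dict κ ν) (k : κ) : d.contains k = PySem.Set.contains d.keys k := by
  rw [Bool.eq_iff_iff]
  simp only [PySem.Dict.contains, PySem.Set.contains, PySem.Dict.keys, List.contains_eq_mem,
    List.any_eq_true, List.mem_map, decide_eq_true_eq, beq_iff_eq]

-- B's setdefault pass: keys in first-appearance order, values untouched
theorem pv_keys_sdfold (l : List (List (String × String))) :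
    ∀ d : PySem.Dict String (List (List (String × String))),
    (l.foldl (fun d e => d.setdefault (pvCat e) ([] : List (List (String × String)))) d).keys
    = PySem.Set.update d.keys (l.map pvCat) := by
  induction l with
  | nil => intro d; simp [PySem.Set.update]
  | cons e l ih =>
    intro d
    rw [List.foldl_cons, ih, List.map_cons]
    have hstep : (d.setdefault (pvCat e) ([] : List (List (String × String)))).keys
        = PySem.Set.add d.keys (pvCat e) := by
      rw [PySem.Dict.keys_setdefault, pv_dict_contains_eq_keys_contains]
      by_cases h : PySem.Set.contains d.keys (pvCat e) = true
      · rw [if_pos h, PySem.Set.add, if_pos (by simpa [PySem.Set.contains] using h)]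
      · rw [if_neg h, PySem.Set.add, if_neg (by simpa [PySem.Set.contains] using h)]
    rw [hstep]
    rfl

theorem pv_getD_sdfold (l : List (List (String × String))) :
    ∀ (d : PySem.Dict String (List (List (String × String)))) (c : String),
    (l.foldl (fun d e => d.setdefault (pvCat e) ([] : List (List (String × String)))) d).getD c []
    = d.getD c [] := by
  induction l with
  | nil => intro d c; rfl
  | cons e l ih =>
    intro d c
    rw [List.foldl_cons, ih]
    by_cases h : c = pvCat e
    · subst h; exact PySem.Dict.getD_setdefault_self d _ _ _
    · simp [PySem.Dict.getD, PySem.Dict.get?_setdefault_of_ne d _ h]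

-- A's second loop: sorts each value in place
theorem pv_getD_sortfold (ks : List String) :
    ∀ (d : PySem.Dict String (List (List (String × String)))) (c : String), ks.Nodup →
    (ks.foldl (fun d c => d.modify c [] (fun v => PySem.List.sorted v pvDate)) d).getD c []
    = if c ∈ ks then PySem.List.sorted (d.getD c []) pvDate else d.getD c [] := by
  induction ks with
  | nil => intro d c _; simp
  | cons k ks ih =>
    intro d c hnd
    rw [List.foldl_cons]
    rcases List.nodup_cons.mp hnd with ⟨hk, hnd'⟩
    by_cases h : c = k
    · subst h
      rw [ih _ c hnd', if_neg hk, if_pos (List.mem_cons_self ..), PySem.Dict.getD_modify_self]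
    · rw [ih _ c hnd', PySem.Dict.getD_modify_of_ne d _ _ h]
      simp [List.mem_cons, h]

theorem pv_set_update_self {α : Type} [BEq α] [LawfulBEq α] (s : PySem.Set α) (xs : List α)
    (h : ∀ x ∈ xs, x ∈ s) : PySem.Set.update s xs = s := by
  rw [PySem.Set.update_eq_append_filter]
  have hnil : List.filter (fun y => !PySem.Set.contains s y) (PySem.Set.ofList xs) = [] := by
    apply List.filter_eq_nil_iff.mpr
    intro y hy
    have hm : y ∈ s := h y ((PySem.Set.mem_ofList xs y).mp hy)
    simp [PySem.Set.contains, List.contains_eq_mem, hm]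
  rw [hnil, List.append_nil]

-- ===== stable sort commutes with filter =====

theorem pv_pairwise_insertBy {α κ : Type} [LinearOrder κ] (key : α → κ) (x : α) (ys : List α)
    (h : ys.Pairwise (fun a b => key a ≤ key b)) :
    (PySem.List.insertBy (fun a b => decide (key a < key b)) x ys).Pairwise
      (fun a b => key a ≤ key b) := by
  induction ys with
  | nil => simp [pv_insertBy_nil]
  | cons y ys ih =>
    rcases List.pairwise_cons.mp h with ⟨hy, hys⟩
    rw [pv_insertBy_cons]
    by_cases hlt : key x < key y
    · rw [if_pos (by simpa using hlt)]
      refine List.pairwise_cons.mpr ⟨?_, h⟩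
      intro z hz
      rcases List.mem_cons.mp hz with rfl | hz
      · exact le_of_lt hlt
      · exact le_of_lt (lt_of_lt_of_le hlt (hy z hz))
    · rw [if_neg (by simpa using hlt)]
      refine List.pairwise_cons.mpr ⟨?_, ih hys⟩
      intro z hz
      rcases (PySem.List.mem_insertBy _ _ _ _).mp hz with rfl | hz
      · exact le_of_not_gt hlt
      · exact hy z hz

theorem pv_filter_insertBy {α κ : Type} [LinearOrder κ] (key : α → κ) (p : α → Bool) (x : α)
    (ys : List α) (h : ys.Pairwise (fun a b => key a ≤ key b)) :
    (PySem.List.insertBy (fun a b => decide (key a < key b)) x ys).filter p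
    = if p x then PySem.List.insertBy (fun a b => decide (key a < key b)) x (ys.filter p)
      else ys.filter p := by
  induction ys with
  | nil => by_cases hp : p x <;> simp [pv_insertBy_nil, hp]
  | cons y ys ih =>
    rcases List.pairwise_cons.mp h with ⟨hy, hys⟩
    rw [pv_insertBy_cons]
    by_cases hlt : key x < key y
    · -- x goes in front; every kept element of y::ys has key > key x
      rw [if_pos (by simpa using hlt)]
      by_cases hp : p x
      · rw [List.filter_cons_of_pos hp, if_pos hp]
        have hgt : ∀ z ∈ List.filter p (y :: ys), key x < key z := by
          intro z hz
          rcases List.mem_cons.mp (List.mem_of_mem_filter hz) with rfl | hz'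
          · exact hlt
          · exact lt_of_lt_of_le hlt (hy z hz')
        cases hfy : List.filter p (y :: ys) with
        | nil => rw [pv_insertBy_nil]
        | cons z zs =>
          have hz : z ∈ List.filter p (y :: ys) := by rw [hfy]; exact List.mem_cons_self ..
          rw [pv_insertBy_cons, if_pos (by simpa using hgt z hz)]
      · rw [List.filter_cons_of_neg hp, if_neg hp]
    · rw [if_neg (by simpa using hlt)]
      by_cases hpy : p y
      · rw [List.filter_cons_of_pos hpy, ih hys, List.filter_cons_of_pos hpy]
        by_cases hp : p x
        · rw [if_pos hp, if_pos hp, pv_insertBy_cons, if_neg (by simpa using hlt)]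
        · rw [if_neg hp, if_neg hp]
      · rw [List.filter_cons_of_neg hpy, ih hys, List.filter_cons_of_neg hpy]

theorem pv_filter_foldl_insertBy {α κ : Type} [LinearOrder κ] (key : α → κ) (p : α → Bool)
    (xs : List α) : ∀ (acc : List α), acc.Pairwise (fun a b => key a ≤ key b) →
    (xs.foldl (fun a x => PySem.List.insertBy (fun a b => decide (key a < key b)) x a) acc).filter p
    = (xs.filter p).foldl (fun a x => PySem.List.insertBy (fun a b => decide (key a < key b)) x a)
        (acc.filter p) := by
  induction xs with
  | nil => intro acc _; simp
  | cons x xs ih =>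
    intro acc hacc
    rw [List.foldl_cons, ih _ (pv_pairwise_insertBy key x acc hacc), pv_filter_insertBy key p x acc hacc]
    by_cases hp : p x
    · rw [if_pos hp, List.filter_cons_of_pos hp, List.foldl_cons]
    · rw [if_neg hp, List.filter_cons_of_neg hp]

-- filtering a stably sorted list = stably sorting the filtered list
theorem pv_filter_sorted {α κ : Type} [LinearOrder κ] (key : α → κ) (p : α → Bool) (xs : List α) :
    (PySem.List.sorted xs key).filter p = PySem.List.sorted (xs.filter p) key := by
  rw [PySem.List.sorted_eq_foldl_insertBy, PySem.List.sorted_eq_foldl_insertBy]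
  simpa using pv_filter_foldl_insertBy key p xs [] (by simp)

-- ===== VERDICT (by name: the statement is the Claim_ definition above) =====
theorem group_events_by_category_spec : Claim_equal_group_events_by_category := by
  intro events _
  show group_events_by_category events = group_events_by_category_alt events
  unfold group_events_by_category group_events_by_category_alt
  -- rewrite A's first loop as the plain modify fold
  rw [show (fun (d : PySem.Dict String (List (List (String × String)))) e =>
        let category := pvCat e
        let d := if d.contains category = true then d
                 else d.insert category ([] : List (List (String × String)))
        d.modify category [] (fun v => v ++ [e]))
      = (fun d e => d.modify (pvCat e) [] (fun v => v ++ [e])) from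
      funext fun d => funext fun e => pv_stepA_eq d e]
  -- names for the two dictionaries
  set dA := events.foldl (fun d e => d.modify (pvCat e) [] (fun v => v ++ [e]))
      PySem.Dict.empty with hdA
  set dB1 := events.foldl (fun d e => d.setdefault (pvCat e)
      ([] : List (List (String × String)))) PySem.Dict.empty with hdB1
  have hkeysA : dA.keys = PySem.Set.ofList (events.map pvCat) := by
    rw [hdA, PySem.Dict.keys_foldl_modify_key events pvCat [] (fun _ e v => v ++ [e])]
    rw [PySem.Set.update_eq_append_filter]
    simp [PySem.Dict.empty, PySem.Dict.keys, PySem.Set.contains, List.contains_eq_mem]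
  have hndA : dA.keys.Nodup := by
    rw [hkeysA]; exact PySem.Set.nodup_ofList _
  have hkeysB1 : dB1.keys = dA.keys := by
    rw [hdB1, pv_keys_sdfold, hkeysA]
    rw [PySem.Set.update_eq_append_filter]
    simp [PySem.Dict.empty, PySem.Dict.keys, PySem.Set.contains, List.contains_eq_mem]
  have hmemdA : ∀ x ∈ (PySem.List.sorted events pvDate).map pvCat, x ∈ dA.keys := by
    intro x hx
    rcases List.mem_map.mp hx with ⟨e, he, rfl⟩
    rw [hkeysA]
    exact (PySem.Set.mem_ofList _ _).mpr (List.mem_map_of_mem ((PySem.List.mem_sorted _ _ _ _).mp he))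
  -- keys of the two final dicts
  set dA2 := dA.keys.foldl (fun d c => d.modify c [] (fun v => PySem.List.sorted v pvDate)) dA
      with hdA2
  set dB2 := (PySem.List.sorted events pvDate).foldl
      (fun d e => d.modify (pvCat e) [] (fun v => v ++ [e])) dB1 with hdB2
  have hkA2 : dA2.keys = dA.keys := by
    rw [hdA2, show (fun (d : PySem.Dict String (List (List (String × String)))) c =>
          d.modify c [] (fun v => PySem.List.sorted v pvDate))
        = (fun d c => d.modify (id c) [] ((fun _ _ v => PySem.List.sorted v pvDate) d c)) from rfl,
      PySem.Dict.keys_foldl_modify_key dA.keys id [] _ dA]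
    simp only [List.map_id]
    exact pv_set_update_self _ _ (fun x hx => hx)
  have hkB2 : dB2.keys = dA.keys := by
    rw [hdB2, PySem.Dict.keys_foldl_modify_key _ pvCat [] (fun _ e v => v ++ [e]), hkeysB1]
    exact pv_set_update_self _ _ hmemdA
  have hndA2 : dA2.keys.Nodup := hkA2 ▸ hndA
  have hndB2 : dB2.keys.Nodup := hkB2 ▸ hndA
  -- compare the items lists pointwise over the common key list
  rw [PySem.Dict.items_eq_map_keys dA2 hndA2 [], PySem.Dict.items_eq_map_keys dB2 hndB2 [],
    hkA2, hkB2]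
  apply List.map_congr_left
  intro c hc
  have hA : dA2.getD c [] = PySem.List.sorted (events.filter (fun e => pvCat e == c)) pvDate := by
    rw [hdA2, pv_getD_sortfold dA.keys dA c hndA, if_pos hc, hdA, pv_getD_groupfold]
    simp [PySem.Dict.empty, PySem.Dict.getD, PySem.Dict.get?]
  have hB : dB2.getD c [] = (PySem.List.sorted events pvDate).filter (fun e => pvCat e == c) := by
    rw [hdB2, pv_getD_groupfold, hdB1, pv_getD_sdfold]
    simp [PySem.Dict.empty, PySem.Dict.getD, PySem.Dict.get?]
  rw [hA, hB, pv_filter_sorted]
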